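-- pv_equiv track=rewrite | github.com/nasun0/UTAHack | script/main.py | decode_unsigned_values
-- ===== SOURCE A (Python) =====
-- DECODING_TABLE = [
--     62, -1, -1, 52, 53, 54, 55, 56, 57, 58, 59, 60, 61, -1, -1, -1, -1, -1, -1,
--     -1, 0, 1, 2, 3, 4, 5, 6, 7, 8, 9, 10, 11, 12, 13, 14, 15, 16, 17, 18, 19,
--     20, 21, 22, 23, 24, 25, -1, -1, -1, -1, 63, -1, 26, 27, 28, 29, 30, 31, 32,
--     33, 34, 35, 36, 37, 38, 39, 40, 41, 42, 43, 44, 45, 46, 47, 48, 49, 50, 51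
-- ]
--
-- def decode_char(char):
--     """Decode a single char to the corresponding value"""
--     char_value = ord(char)
--     value = DECODING_TABLE[char_value - 45]
--     return value
--
-- def decode_unsigned_values(encoded):
--     result = shift = 0
--     for char in encoded:
--         value = decode_char(char)
--         result |= (value & 0x1F) << shift
--         if (value & 0x20) == 0:
--             yield result
--             result = shift = 0
--         else:
--             shift += 5
-- ===== SOURCE B (Python) =====
-- DECODING_TABLE = [
--     62, -1, -1, 52, 53, 54, 55, 56, 57, 58, 59, 60, 61, -1, -1, -1, -1, -1, -1,
--     -1, 0, 1, 2, 3, 4, 5, 6, 7, 8, 9, 10, 11, 12, 13, 14, 15, 16, 17, 18, 19,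
--     20, 21, 22, 23, 24, 25, -1, -1, -1, -1, 63, -1, 26, 27, 28, 29, 30, 31, 32,
--     33, 34, 35, 36, 37, 38, 39, 40, 41, 42, 43, 44, 45, 46, 47, 48, 49, 50, 51
-- ]
--
-- def decode_char(char):
--     """Decode a single char to the corresponding value"""
--     char_value = ord(char)
--     value = DECODING_TABLE[char_value - 45]
--     return value
--
-- def decode_unsigned_values(encoded):
--     # buffer the 5-bit payloads, then combine arithmetically back-to-front
--     groups = []
--     for char in encoded:
--         value = decode_char(char)
--         groups.append(value % 32)
--         if value % 64 < 32:
--             n = 0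
--             for g in reversed(groups):
--                 n = n * 32 + g
--             yield n
--             groups = []
-- ===== Notes on version B (the rewrite author's own statement) =====
-- stated objective: alternative
-- what changed: Replaces A's running bitwise accumulator (result |= payload << shift with a shift counter) by buffering the arithmetic 5-bit payloads (value % 32) and combining them back-to-front with n = n*32 + g at each terminator, eliminating all bitwise operations and the shift state.
import Mathlib
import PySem

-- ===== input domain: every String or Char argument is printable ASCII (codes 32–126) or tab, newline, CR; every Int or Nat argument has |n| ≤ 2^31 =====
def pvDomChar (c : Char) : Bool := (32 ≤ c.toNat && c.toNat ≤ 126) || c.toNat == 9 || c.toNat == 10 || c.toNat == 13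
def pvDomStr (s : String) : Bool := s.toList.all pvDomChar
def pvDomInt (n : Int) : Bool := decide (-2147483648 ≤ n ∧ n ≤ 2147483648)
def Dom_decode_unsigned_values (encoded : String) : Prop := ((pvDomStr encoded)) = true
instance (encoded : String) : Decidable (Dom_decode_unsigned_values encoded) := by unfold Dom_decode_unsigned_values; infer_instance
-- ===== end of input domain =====

-- B replaces A's running bitwise result/shift accumulator with a buffer of arithmetic
-- 5-bit payloads combined back-to-front on each terminator (objective: alternative).

-- ===== PORT A =====
def DECODING_TABLE : List Int := [
    62, -1, -1, 52, 53, 54, 55, 56, 57, 58, 59, 60, 61, -1, -1, -1, -1, -1, -1,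
    -1, 0, 1, 2, 3, 4, 5, 6, 7, 8, 9, 10, 11, 12, 13, 14, 15, 16, 17, 18, 19,
    20, 21, 22, 23, 24, 25, -1, -1, -1, -1, 63, -1, 26, 27, 28, 29, 30, 31, 32,
    33, 34, 35, 36, 37, 38, 39, 40, 41, 42, 43, 44, 45, 46, 47, 48, 49, 50, 51]

def decode_char (char : Char) : Int :=
  let char_value : Int := (char.toNat : Int)
  -- DECODING_TABLE[char_value - 45]: negative index wraps like Python's; none = IndexError, excluded by Pre_
  (PySem.List.pyGet? DECODING_TABLE (char_value - 45)).getD 0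

def pvA_loop : List Char → Int → Nat → List Int
  | [], _, _ => []
  | char :: rest, result, shift =>
    let value := decode_char char
    let result := PySem.Int.bor result ((PySem.Int.band value 31) <<< shift)
    if PySem.Int.band value 32 = 0 then result :: pvA_loop rest 0 0
    else pvA_loop rest result (shift + 5)

def decode_unsigned_values (encoded : String) : List Int :=
  pvA_loop encoded.toList 0 0

-- ===== PORT B =====
def pvB_loop : List Char → List Int → List Int
  | [], _ => []
  | char :: rest, groups =>
    let value := decode_char char
    let groups := groups ++ [PySem.Int.mod value 32]
    if PySem.Int.mod value 64 < 32 then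
      (groups.reverse.foldl (fun n g => n * 32 + g) 0) :: pvB_loop rest []
    else pvB_loop rest groups

def decode_unsigned_values_alt (encoded : String) : List Int :=
  pvB_loop encoded.toList []

-- ===== PRECONDITION & SPEC =====
-- Pre_ excludes exactly the characters with code ≥ 123 ('{','|','}','~'), on which
-- DECODING_TABLE[ord(c) - 45] is an IndexError in both A and B (indices 78..81).
def Pre_decode_unsigned_values (encoded : String) : Prop :=
  (encoded.toList.all (fun c => c.toNat ≤ 122)) = true
instance (encoded : String) : Decidable (Pre_decode_unsigned_values encoded) := by
  unfold Pre_decode_unsigned_values; infer_instance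

def pvWitness_decode_unsigned_values : String := "B"

def Spec_decode_unsigned_values (encoded : String) (out : List Int) : Prop := out = decode_unsigned_values_alt encoded
instance (encoded : String) (out : List Int) : Decidable (Spec_decode_unsigned_values encoded out) := by unfold Spec_decode_unsigned_values; infer_instance

-- ===== CLAIM (what is proved, stated in full; the proofs are below) =====
def Claim_equal_decode_unsigned_values : Prop := ∀ (encoded : String), Dom_decode_unsigned_values encoded → Pre_decode_unsigned_values encoded → Spec_decode_unsigned_values encoded (decode_unsigned_values encoded)

-- ===== LEMMAS AND PROOFS =====

-- value of a buffer of 5-bit groups, least-significant group first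
def gval : List Int → Int
  | [] => 0
  | g :: gs => gval gs * 32 + g

theorem gval_eq_foldl (gs : List Int) :
    gs.reverse.foldl (fun n g => n * 32 + g) 0 = gval gs := by
  rw [List.foldl_reverse]
  induction gs with
  | nil => rfl
  | cons g gs ih => simp [gval, ih]

theorem gval_append (gs : List Int) (p : Int) :
    gval (gs ++ [p]) = gval gs + p * 32 ^ gs.length := by
  induction gs with
  | nil => simp [gval]
  | cons g gs ih => simp [gval, ih]; ring

theorem gval_bounds (gs : List Int) (h : ∀ g ∈ gs, 0 ≤ g ∧ g < 32) :
    0 ≤ gval gs ∧ gval gs < 32 ^ gs.length := by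
  induction gs with
  | nil => simp [gval]
  | cons g gs ih =>
    have hg := h g (by simp)
    have ih' := ih (fun x hx => h x (by simp [hx]))
    simp [gval, pow_succ]
    constructor
    · nlinarith [ih'.1, hg.1]
    · nlinarith [ih'.2, hg.2]

theorem lor_shift_add : ∀ (k a b : Nat), a < 2 ^ k → a ||| (b <<< k) = a + b * 2 ^ k := by
  intro k
  induction k with
  | zero => intro a b h; interval_cases a; simp [Nat.shiftLeft_eq]
  | succ k ih =>
    intro a b h
    have ha : a = Nat.bit (decide (a % 2 = 1)) (a / 2) := by
      simp [Nat.bit]; rcases Nat.mod_two_eq_zero_or_one a with h2 | h2 <;> simp [h2] <;> omega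
    have hb : b <<< (k + 1) = Nat.bit false (b <<< k) := by
      simp [Nat.bit, Nat.shiftLeft_eq, Nat.pow_succ]; ring
    rw [ha, hb, Nat.lor_bit]
    have h2 : a / 2 < 2 ^ k := by rw [Nat.pow_succ] at h; omega
    have h3 := ih (a / 2) b h2
    simp [Nat.bit, h3, Nat.pow_succ]
    rcases Nat.mod_two_eq_zero_or_one a with h2 | h2 <;> simp [h2] <;> ring_nf

-- Int version of disjoint-or-is-add, for A's 'result |= payload << shift'
theorem bor_shift_add (a p : Int) (k : Nat) (ha : 0 ≤ a) (hak : a < 2 ^ k) (hp : 0 ≤ p) :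
    PySem.Int.bor a (p <<< k) = a + p * 2 ^ k := by
  have hcast : ((2 : Int) ^ k) = ((2 ^ k : Nat) : Int) := by push_cast; ring
  have hsh : p <<< k = p * 2 ^ k := by
    simp [Int.shiftLeft_eq]
  have hps : 0 ≤ p * 2 ^ k := by positivity
  rw [hsh, PySem.Int.bor_of_nonneg ha hps]
  rcases Int.eq_ofNat_of_zero_le hp with ⟨m, rfl⟩
  rcases Int.eq_ofNat_of_zero_le ha with ⟨n, rfl⟩
  have h1 : (((m : Int)) * 2 ^ k).toNat = (m : Int).toNat <<< k := by
    rw [Nat.shiftLeft_eq, hcast, ← Int.natCast_mul, Int.toNat_natCast, Int.toNat_natCast]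
  have h2 : (n : Int).toNat < 2 ^ k := by rw [hcast] at hak; omega
  rw [h1, lor_shift_add k _ _ h2]
  simp only [Int.toNat_natCast]
  push_cast
  ring

-- the bitwise and arithmetic forms agree on every value A's table can produce
theorem table_facts : ∀ v ∈ DECODING_TABLE,
    PySem.Int.band v 31 = PySem.Int.mod v 32 ∧
    (PySem.Int.band v 32 = 0 ↔ PySem.Int.mod v 64 < 32) ∧
    0 ≤ PySem.Int.mod v 32 ∧ PySem.Int.mod v 32 < 32 := by decide

theorem loop_eq : ∀ (l : List Char) (groups : List Int),
    (∀ c ∈ l, c.toNat ≤ 122) →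
    (∀ g ∈ groups, 0 ≤ g ∧ g < 32) →
    pvA_loop l (gval groups) (5 * groups.length) = pvB_loop l groups := by
  intro l
  induction l with
  | nil => intro groups _ _; rfl
  | cons c rest ih =>
    intro groups hpre hb
    have hc : c.toNat ≤ 122 := hpre c (by simp)
    have hrest : ∀ x ∈ rest, x.toNat ≤ 122 := fun x hx => hpre x (by simp [hx])
    -- decode_char c is some table value
    have hlen : DECODING_TABLE.length = 78 := by decide
    have hin : PySem.Raise.InRange DECODING_TABLE.length (((c.toNat : Int)) - 45) := by
      constructor <;> simp [hlen] <;> omega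
    obtain ⟨v, hv⟩ : ∃ v, PySem.List.pyGet? DECODING_TABLE (((c.toNat : Int)) - 45) = some v := by
      rcases hres : PySem.List.pyGet? DECODING_TABLE (((c.toNat : Int)) - 45) with _ | v
      · exfalso; rw [PySem.List.pyGet?_eq_none_iff] at hres; exact hres hin
      · exact ⟨v, rfl⟩
    have hdc : decode_char c = v := by simp [decode_char, hv]
    have hmem : v ∈ DECODING_TABLE := PySem.List.mem_of_pyGet?_eq_some _ hv
    obtain ⟨hband, hiff, hp0, hp32⟩ := table_facts v hmem
    have hgb := gval_bounds groups hb
    have hpow : (32 : Int) ^ groups.length = 2 ^ (5 * groups.length) := by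
      rw [pow_mul]; norm_num
    have hkey : PySem.Int.bor (gval groups) ((PySem.Int.band v 31) <<< (5 * groups.length)) =
        gval (groups ++ [PySem.Int.mod v 32]) := by
      rw [hband, gval_append,
        bor_shift_add _ _ _ hgb.1 (by rw [← hpow]; exact hgb.2) hp0, hpow]
    have hb' : ∀ g ∈ groups ++ [PySem.Int.mod v 32], 0 ≤ g ∧ g < 32 := by
      intro g hg
      rcases List.mem_append.mp hg with h | h
      · exact hb g h
      · rw [List.mem_singleton.mp h]; exact ⟨hp0, hp32⟩
    rw [pvA_loop, pvB_loop]
    simp only [hdc, hkey]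
    by_cases hz : PySem.Int.band v 32 = 0
    · rw [if_pos hz, if_pos (hiff.mp hz), gval_eq_foldl]
      have := ih [] hrest (by simp)
      simp [gval] at this
      rw [this]
    · rw [if_neg hz, if_neg (fun h => hz (hiff.mpr h))]
      have := ih (groups ++ [PySem.Int.mod v 32]) hrest hb'
      simp at this ⊢
      rw [show 5 * groups.length + 5 = 5 * (groups.length + 1) by ring]
      exact this

-- ===== VERDICT (by name: the statement is the Claim_ definition above) =====
theorem decode_unsigned_values_spec : Claim_equal_decode_unsigned_values := by
  intro encoded _ hpre0
  have hpre : ∀ c ∈ encoded.toList, c.toNat ≤ 122 := by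
    intro c hc; exact of_decide_eq_true (List.all_eq_true.mp hpre0 c hc)
  unfold Spec_decode_unsigned_values decode_unsigned_values decode_unsigned_values_alt
  have := loop_eq encoded.toList [] hpre (by simp)
  simpa [gval] using this
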